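-- pv_equiv track=rewrite | github.com/wangfeng28/loha-port-forwarder | src/loha/system_features.py | _detect_rp_filter_mode
-- ===== SOURCE A (Python) =====
-- from typing import Callable, Dict, Iterable, List, Mapping, Optional, Tuple
--
-- def _detect_rp_filter_mode(default_value: str, all_value: str, iface_values: Mapping[str, str]) -> str:
--     iface_count = len(iface_values)
--     if iface_count == 0 and not default_value and not all_value:
--         return "runtime_only"
--     if default_value == "2" and all_value == "2":
--         if iface_count == 0 or all(value == "2" for value in iface_values.values()):
--             return "loose_global"
--     if default_value == "1" and all_value == "1":
--         if iface_count == 0 or all(value == "1" for value in iface_values.values()):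
--             return "strict"
--     if not default_value and not all_value:
--         if iface_count > 0 and all(value == "1" for value in iface_values.values()):
--             return "strict"
--         if iface_count > 0 and all(value == "2" for value in iface_values.values()):
--             return "loose_scoped"
--     return "custom"
-- ===== SOURCE B (Python) =====
-- def _detect_rp_filter_mode(default_value: str, all_value: str, iface_values) -> str:
--     # One early-exit pass condenses the interface settings into a single summary
--     # ("uniform" = the common value, "mixed" on the first disagreement, None if no
--     # interfaces); classification is then a table lookup keyed by that summary.
--     uniform = None
--     for value in iface_values.values():
--         if uniform is None:
--             uniform = value
--         elif value != uniform:
--             uniform = "mixed"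
--             break
--     if uniform is None:
--         if not default_value and not all_value:
--             return "runtime_only"
--         if default_value == "2" and all_value == "2":
--             return "loose_global"
--         if default_value == "1" and all_value == "1":
--             return "strict"
--         return "custom"
--     table = {
--         ("2", "2", "2"): "loose_global",
--         ("1", "1", "1"): "strict",
--         ("", "", "1"): "strict",
--         ("", "", "2"): "loose_scoped",
--     }
--     return table.get((default_value, all_value, uniform), "custom")
-- ===== Notes on version B (the rewrite author's own statement) =====
-- stated objective: alternative
-- what changed: B condenses the interface settings in one early-exit pass into a single summary (the common value, 'mixed' at the first disagreement, or absent) and then classifies by a lookup table keyed by (default, all, summary), replacing A's per-branch all() scans and count guards.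
import Mathlib
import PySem

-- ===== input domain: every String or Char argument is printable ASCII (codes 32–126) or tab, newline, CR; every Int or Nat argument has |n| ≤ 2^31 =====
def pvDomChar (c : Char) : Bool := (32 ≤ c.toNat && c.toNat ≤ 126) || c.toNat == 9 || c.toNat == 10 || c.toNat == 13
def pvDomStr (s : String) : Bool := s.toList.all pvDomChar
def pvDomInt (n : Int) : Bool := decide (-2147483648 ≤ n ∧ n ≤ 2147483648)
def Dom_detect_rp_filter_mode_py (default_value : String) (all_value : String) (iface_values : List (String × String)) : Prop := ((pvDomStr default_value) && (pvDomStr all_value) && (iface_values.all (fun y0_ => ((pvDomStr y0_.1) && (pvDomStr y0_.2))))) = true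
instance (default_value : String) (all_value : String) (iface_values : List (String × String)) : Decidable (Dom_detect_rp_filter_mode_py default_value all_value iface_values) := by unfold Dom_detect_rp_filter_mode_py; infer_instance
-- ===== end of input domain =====

-- B replaces A's per-branch all() scans by one early-exit pass condensing the values
-- into a summary (common value / "mixed" / absent) followed by a table lookup ("alternative").

-- ===== PORT A =====
-- Port of A: per-branch all() scans over the dict's values, with explicit count guards.
def detect_rp_filter_mode_py (default_value : String) (all_value : String) (iface_values : List (String × String)) : String :=
  let d := PySem.Dict.ofList iface_values
  let iface_count := d.size
  if iface_count = 0 ∧ default_value = "" ∧ all_value = "" then "runtime_only"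
  else if (default_value = "2" ∧ all_value = "2") ∧ (iface_count = 0 ∨ d.values.all (fun value => value == "2") = true) then "loose_global"
  else if (default_value = "1" ∧ all_value = "1") ∧ (iface_count = 0 ∨ d.values.all (fun value => value == "1") = true) then "strict"
  else if (default_value = "" ∧ all_value = "") ∧ (iface_count > 0 ∧ d.values.all (fun value => value == "1") = true) then "strict"
  else if (default_value = "" ∧ all_value = "") ∧ (iface_count > 0 ∧ d.values.all (fun value => value == "2") = true) then "loose_scoped"
  else "custom"

-- ===== PORT B =====
-- the for-loop with break: uniform accumulator over the remaining values
def pvUniformLoop : Option String → List String → Option String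
  | u, [] => u
  | u, v :: rest =>
    match u with
    | none => pvUniformLoop (some v) rest
    | some x => if v ≠ x then some "mixed" else pvUniformLoop (some x) rest

-- Port of B: one early-exit summarising pass, then a table lookup on (default, all, uniform).
def detect_rp_filter_mode_py_alt (default_value : String) (all_value : String) (iface_values : List (String × String)) : String :=
  let uniform := pvUniformLoop none (PySem.Dict.ofList iface_values).values
  match uniform with
  | none =>
    if default_value = "" ∧ all_value = "" then "runtime_only"
    else if default_value = "2" ∧ all_value = "2" then "loose_global"
    else if default_value = "1" ∧ all_value = "1" then "strict"
    else "custom"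
  | some u =>
    let table : PySem.Dict (String × String × String) String :=
      PySem.Dict.ofList [(("2", "2", "2"), "loose_global"), (("1", "1", "1"), "strict"),
                         (("", "", "1"), "strict"), (("", "", "2"), "loose_scoped")]
    table.getD (default_value, all_value, u) "custom"

-- ===== PRECONDITION & SPEC =====
def Spec_detect_rp_filter_mode_py (default_value : String) (all_value : String) (iface_values : List (String × String)) (out : String) : Prop := out = detect_rp_filter_mode_py_alt default_value all_value iface_values
instance (default_value : String) (all_value : String) (iface_values : List (String × String)) (out : String) : Decidable (Spec_detect_rp_filter_mode_py default_value all_value iface_values out) := by unfold Spec_detect_rp_filter_mode_py; infer_instance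

-- ===== CLAIM =====
def Claim_equal_detect_rp_filter_mode_py : Prop := ∀ (default_value : String) (all_value : String) (iface_values : List (String × String)), Dom_detect_rp_filter_mode_py default_value all_value iface_values → Spec_detect_rp_filter_mode_py default_value all_value iface_values (detect_rp_filter_mode_py default_value all_value iface_values)

-- ===== LEMMAS AND PROOFS =====

-- the literal table, looked up at a variable key, as an if-chain
lemma pvTable_getD (d a v : String) :
    (PySem.Dict.ofList [(("2", "2", "2"), "loose_global"), (("1", "1", "1"), "strict"),
                         (("", "", "1"), "strict"), (("", "", "2"), "loose_scoped")]).getD (d, a, v) "custom"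
    = if d = "2" ∧ a = "2" ∧ v = "2" then "loose_global"
      else if d = "1" ∧ a = "1" ∧ v = "1" then "strict"
      else if d = "" ∧ a = "" ∧ v = "1" then "strict"
      else if d = "" ∧ a = "" ∧ v = "2" then "loose_scoped"
      else "custom" := by
  simp only [show (PySem.Dict.ofList [(("2", "2", "2"), "loose_global"), (("1", "1", "1"), "strict"),
                         (("", "", "1"), "strict"), (("", "", "2"), "loose_scoped")] : PySem.Dict (String × String × String) String)
     = PySem.Dict.mk [(("2", "2", "2"), "loose_global"), (("1", "1", "1"), "strict"),
                         (("", "", "1"), "strict"), (("", "", "2"), "loose_scoped")] from rfl,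
    PySem.Dict.getD_eq_get?_getD, PySem.Dict.get?_mk_cons, beq_iff_eq, Prod.mk.injEq]
  simp only [eq_comm]
  split_ifs <;> simp_all [PySem.Dict.get?]

-- the loop computes the common value, or "mixed" at the first disagreement
lemma pvUniformLoop_spec (x : String) (rest : List String) :
    pvUniformLoop (some x) rest =
      if rest.all (fun v => v == x) then some x else some "mixed" := by
  induction rest with
  | nil => simp [pvUniformLoop]
  | cons v rest ih =>
    by_cases h : v = x <;> simp [pvUniformLoop, h, ih]

-- ===== VERDICT =====
set_option maxRecDepth 2048 in
theorem detect_rp_filter_mode_py_spec : Claim_equal_detect_rp_filter_mode_py := by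
  intro default_value all_value iface_values hdom
  clear hdom
  unfold Spec_detect_rp_filter_mode_py detect_rp_filter_mode_py detect_rp_filter_mode_py_alt
  have hlen : (PySem.Dict.ofList iface_values).size = (PySem.Dict.ofList iface_values).values.length := by
    simp [PySem.Dict.size, PySem.Dict.values]
  simp only [hlen]
  generalize (PySem.Dict.ofList iface_values).values = vs
  clear hlen
  cases vs with
  | nil =>
    simp only [pvUniformLoop]
    split_ifs <;> simp_all
  | cons v rest =>
    simp only [pvUniformLoop, pvUniformLoop_spec]
    by_cases hall : rest.all (fun w => w == v) = true
    · -- uniform = some v: every all() scan of A reduces to a test on v alone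
      simp only [hall, if_true]
      rw [pvTable_getD]
      have hv : ∀ w ∈ rest, w = v := by simpa using hall
      have hac : ∀ c : String, ((v :: rest).all fun w => w == c) = (v == c) := by
        intro c
        by_cases h : v = c
        · subst h; simpa [List.all_cons, List.all_eq_true] using hv
        · simp [List.all_cons, h]
      simp only [hac, List.length_cons, beq_iff_eq]
      clear hall hv hac
      split_ifs <;> simp_all
    · -- mixed: every all() scan of A is false
      simp only [Bool.not_eq_true] at hall
      simp only [hall, Bool.false_eq_true, if_false]
      rw [pvTable_getD]
      have hac : ∀ c : String, ((v :: rest).all fun w => w == c) = false := by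
        intro c
        simp only [List.all_eq_false] at hall ⊢
        obtain ⟨w, hw, hne⟩ := hall
        by_cases h : v = c
        · exact ⟨w, List.mem_cons_of_mem _ hw, by simp_all⟩
        · exact ⟨v, List.mem_cons_self, by simp [h]⟩
      simp only [hac, List.length_cons, Bool.false_eq_true]
      clear hall hac
      split_ifs <;> simp_all
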